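-- pv_equiv track=rewrite | github.com/lassehjorthmadsen/raccoon | raccoon/eval/match_log.py | _split_token_to_die_moves
-- ===== SOURCE A (Python) =====
-- def _normalize_segment(seg: str) -> tuple[str, bool]:
--     """Translate one ``/``-separated segment to XG point notation.
--
--     Returns ``(point_str, has_hit_marker)``. ``Bar`` becomes ``25``, ``Off``
--     becomes ``0``, and a trailing ``*`` (hit marker) is reported separately.
--     """
--     has_hit = seg.endswith("*")
--     base = seg[:-1] if has_hit else seg
--     if base == "Bar":
--         base = "25"
--     elif base == "Off":
--         base = "0"
--     return base, has_hit
--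
-- def _split_token_to_die_moves(token: str) -> list[str]:
--     """Split one OpenSpiel checker token into per-die sub-moves.
--
--     Examples::
--
--         '13/9'         -> ['13/9']
--         '13/9/3'       -> ['13/9', '9/3']
--         'Bar/20*/17'   -> ['25/20*', '20/17']
--         '8/3*/Off'     -> ['8/3*', '3/0']
--     """
--     segs = token.split("/")
--     if len(segs) < 2:
--         return []
--     sub_moves: list[str] = []
--     for i in range(len(segs) - 1):
--         src, _ = _normalize_segment(segs[i])
--         dst, dst_hit = _normalize_segment(segs[i + 1])
--         marker = "*" if dst_hit else ""
--         sub_moves.append(f"{src}/{dst}{marker}")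
--     return sub_moves
-- ===== SOURCE B (Python) =====
-- _POINT_ALIASES = {"Bar": "25", "Off": "0"}
--
--
-- def _split_token_to_die_moves(token: str) -> list[str]:
--     """Single recursive pass: thread the previous normalized point through,
--     normalizing each segment exactly once."""
--
--     def norm(seg: str) -> tuple[str, bool]:
--         hit = seg.endswith("*")
--         base = seg[:-1] if hit else seg
--         return _POINT_ALIASES.get(base, base), hit
--
--     def emit(prev: str, rest: list[str]) -> list[str]:
--         if not rest:
--             return []
--         base, hit = norm(rest[0])
--         return [prev + "/" + base + ("*" if hit else "")] + emit(base, rest[1:])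
--
--     segs = token.split("/")
--     return emit(norm(segs[0])[0], segs[1:])
-- ===== Notes on version B (the rewrite author's own statement) =====
-- stated objective: alternative
-- what changed: Replaces the length-guarded index loop that re-normalizes each inner segment twice by a single recursive pass that threads the previous normalized point through as an accumulator, normalizing every segment exactly once (alias mapping via a lookup table instead of an if/elif chain).
import Mathlib
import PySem

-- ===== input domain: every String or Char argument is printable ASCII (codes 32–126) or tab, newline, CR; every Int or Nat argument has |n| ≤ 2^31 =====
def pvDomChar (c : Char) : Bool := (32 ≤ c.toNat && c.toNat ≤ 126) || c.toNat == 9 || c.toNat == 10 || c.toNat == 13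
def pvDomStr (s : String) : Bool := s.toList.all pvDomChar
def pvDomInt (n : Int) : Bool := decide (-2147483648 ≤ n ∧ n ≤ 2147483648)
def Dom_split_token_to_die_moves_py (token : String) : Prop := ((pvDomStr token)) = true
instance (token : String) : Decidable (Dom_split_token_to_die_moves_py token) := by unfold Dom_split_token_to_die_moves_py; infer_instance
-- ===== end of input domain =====

-- B replaces A's index loop (which normalizes each inner segment twice) by one recursive
-- pass threading the previous normalized point as an accumulator; objective: alternative.

-- ===== PORT A =====
-- Python _normalize_segment, as A writes it (if/elif chain)
def normalizeSegment (seg : List Char) : List Char × Bool :=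
  let hasHit := PySem.Chars.endswith seg ['*']
  let base := if hasHit then PySem.Chars.slice seg none (some (-1)) else seg
  let base := if base = "Bar".toList then "25".toList
              else if base = "Off".toList then "0".toList
              else base
  (base, hasHit)

def split_token_to_die_moves_py (token : String) : List String :=
  let segs := PySem.Chars.splitOn token.toList ['/']
  if segs.length < 2 then []
  else
    (PySem.List.pyRange 0 ((segs.length : Int) - 1) 1).foldl
      (fun acc i =>
        let src := (normalizeSegment (PySem.List.pyGetD segs i [])).1
        let dh := normalizeSegment (PySem.List.pyGetD segs (i + 1) [])
        let marker := if dh.2 then ['*'] else []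
        acc ++ [String.ofList (src ++ '/' :: dh.1 ++ marker)]) []

-- ===== PORT B =====
-- Source B's _POINT_ALIASES table and norm helper (alias lookup via dict.get)
def pointAliases : PySem.Dict (List Char) (List Char) :=
  PySem.Dict.ofList [("Bar".toList, "25".toList), ("Off".toList, "0".toList)]

def normB (seg : List Char) : List Char × Bool :=
  let hit := PySem.Chars.endswith seg ['*']
  let base := if hit then PySem.Chars.slice seg none (some (-1)) else seg
  (PySem.Dict.getD pointAliases base base, hit)

-- Source B's emit: recursive pass carrying the previous normalized point
def emitB (prev : List Char) : List (List Char) → List String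
  | [] => []
  | s :: rest =>
    let n := normB s
    String.ofList (prev ++ '/' :: n.1 ++ (if n.2 then ['*'] else [])) :: emitB n.1 rest

def split_token_to_die_moves_py_alt (token : String) : List String :=
  match PySem.Chars.splitOn token.toList ['/'] with
  | [] => []  -- unreachable: str.split never returns an empty list
  | s :: rest => emitB (normB s).1 rest

-- ===== PRECONDITION & SPEC =====
def Spec_split_token_to_die_moves_py (token : String) (out : List String) : Prop := out = split_token_to_die_moves_py_alt token
instance (token : String) (out : List String) : Decidable (Spec_split_token_to_die_moves_py token out) := by unfold Spec_split_token_to_die_moves_py; infer_instance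

-- ===== CLAIM (what is proved, stated in full; the proofs are below) =====
def Claim_equal_split_token_to_die_moves_py : Prop := ∀ (token : String), Dom_split_token_to_die_moves_py token → Spec_split_token_to_die_moves_py token (split_token_to_die_moves_py token)

-- ===== LEMMAS AND PROOFS =====

-- B's dict lookup computes A's if/elif alias chain
theorem normB_eq (seg : List Char) : normB seg = normalizeSegment seg := by
  have hpa : pointAliases =
      (PySem.Dict.empty.insert "Bar".toList "25".toList).insert "Off".toList "0".toList := by
    decide
  unfold normB normalizeSegment
  rw [hpa]
  simp only [PySem.Dict.getD_insert, PySem.Dict.getD_empty]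
  split_ifs <;> simp_all

-- the pair string emitted for source s and destination d
def pairStr (s d : List Char) : String :=
  String.ofList ((normalizeSegment s).1 ++ '/' :: (normalizeSegment d).1 ++
    (if (normalizeSegment d).2 then ['*'] else []))

-- the indexed loop over adjacent positions is the zip of the list with its tail
theorem range_map_adj_eq_zip {α β : Type} (xs : List α) (d : α) (f : α → α → β) :
    (List.range (xs.length - 1)).map
        (fun i => f (xs.getD i d) (xs.getD (i + 1) d))
      = (xs.zip xs.tail).map (fun p => f p.1 p.2) := by
  induction xs with
  | nil => simp
  | cons a t ih =>
    cases t with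
    | nil => simp
    | cons b t' =>
      simp only [List.length_cons, Nat.add_sub_cancel, List.range_succ_eq_map,
        List.map_cons, List.map_map, List.tail_cons, List.zip_cons_cons]
      refine congrArg₂ _ rfl ?_
      have := ih
      simp only [List.length_cons, Nat.add_sub_cancel, List.tail_cons] at this
      rw [← this]
      simp [Function.comp_def]

-- A's loop, characterised as mapping pairStr over adjacent segments
theorem portA_eq_zip (token : String) :
    split_token_to_die_moves_py token =
      let segs := PySem.Chars.splitOn token.toList ['/']
      (segs.zip segs.tail).map (fun p => pairStr p.1 p.2) := by
  unfold split_token_to_die_moves_py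
  set segs := PySem.Chars.splitOn token.toList ['/'] with hsegs
  simp only []
  by_cases h2 : segs.length < 2
  · rw [if_pos h2]
    match segs, h2 with
    | [], _ => simp
    | [a], _ => simp
  · rw [if_neg h2]
    have hcast : ((segs.length : Int) - 1) = ((segs.length - 1 : Nat) : Int) := by
      omega
    rw [PySem.List.foldl_append_singleton_eq_map, hcast, PySem.List.pyRange_zero_natCast,
      List.map_map, List.nil_append]
    rw [← range_map_adj_eq_zip segs [] (fun s d => pairStr s d)]
    refine List.map_congr_left ?_
    intro i hi
    simp only [Function.comp_apply, pairStr]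
    rw [show ((i : Int) + 1) = (((i + 1 : Nat)) : Int) by push_cast; ring]
    simp only [PySem.List.pyGetD_natCast, List.getD_eq_getElem?_getD]

-- B's recursion, characterised the same way
theorem emitB_eq_zip (rest : List (List Char)) :
    ∀ (s : List Char), emitB (normB s).1 rest =
      ((s :: rest).zip rest).map (fun p => pairStr p.1 p.2) := by
  induction rest with
  | nil => intro s; rfl
  | cons d rest ih =>
    intro s
    have ihd := ih d
    rw [normB_eq] at ihd
    simp only [emitB, List.zip_cons_cons, List.map_cons, normB_eq, pairStr, ihd]

theorem ports_eq (token : String) :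
    split_token_to_die_moves_py token = split_token_to_die_moves_py_alt token := by
  rw [portA_eq_zip]
  unfold split_token_to_die_moves_py_alt
  cases h : PySem.Chars.splitOn token.toList ['/'] with
  | nil => simp
  | cons s rest => simp [emitB_eq_zip rest s]

-- ===== VERDICT (by name: the statement is the Claim_ definition above) =====
theorem split_token_to_die_moves_py_spec : Claim_equal_split_token_to_die_moves_py := by
  intro token _
  exact ports_eq token
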